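-- pv_equiv track=rewrite | github.com/phidalg/TP-Integrador-2-MAT | ops_dni.py | calcular_diferencia_simetrica
-- ===== SOURCE A (Python) =====
-- def calcular_union(conjunto1, conjunto2):
--
--     union = conjunto1[:]
--
--     for digito in conjunto2:
--
--         if digito not in union:
--             union.append(digito)
--
--     return union
--
-- def calcular_interseccion(conjunto1, conjunto2):
--
--     interseccion = []
--
--     for digito in conjunto2:
--
--         if digito in conjunto1:
--             interseccion.append(digito)
--
--     return interseccion
--
-- def calcular_diferencia_simetrica(conjunto1, conjunto2):
--
--     union = calcular_union(conjunto1, conjunto2)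
--     interseccion = calcular_interseccion(conjunto1, conjunto2)
--     diferencia_simetrica = []
--
--     for digito in union:
--         if digito not in interseccion:
--             diferencia_simetrica.append(digito)
--
--     return diferencia_simetrica
-- ===== SOURCE B (Python) =====
-- def calcular_diferencia_simetrica(conjunto1, conjunto2):
--     # Single-result build: no union/intersection intermediates.
--     resultado = []
--     for d in conjunto1:
--         if d not in conjunto2:
--             resultado.append(d)
--     for d in conjunto2:
--         if d not in conjunto1 and d not in resultado:
--             resultado.append(d)
--     return resultado
-- ===== Notes on version B (the rewrite author's own statement) =====
-- stated objective: simpler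
-- what changed: B drops the union and intersection intermediate lists and builds the symmetric difference directly in two passes (conjunto1 digits not in conjunto2, then conjunto2 digits not in conjunto1 deduped against the result).
import Mathlib
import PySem

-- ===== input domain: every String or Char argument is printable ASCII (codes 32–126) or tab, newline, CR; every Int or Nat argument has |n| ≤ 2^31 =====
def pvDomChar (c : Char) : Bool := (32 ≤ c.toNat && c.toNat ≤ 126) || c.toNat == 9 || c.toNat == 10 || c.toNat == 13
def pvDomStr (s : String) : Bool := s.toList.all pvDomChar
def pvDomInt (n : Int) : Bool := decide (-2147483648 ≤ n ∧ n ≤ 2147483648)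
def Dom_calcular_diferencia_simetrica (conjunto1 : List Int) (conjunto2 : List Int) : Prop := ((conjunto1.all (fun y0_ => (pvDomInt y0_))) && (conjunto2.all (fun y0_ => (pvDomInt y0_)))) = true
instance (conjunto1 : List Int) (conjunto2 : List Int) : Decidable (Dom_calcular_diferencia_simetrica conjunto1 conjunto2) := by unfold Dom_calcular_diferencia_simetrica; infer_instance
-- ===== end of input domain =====

-- B builds the symmetric difference directly in two passes, dropping A's union/intersection intermediates (objective: simpler).


-- ===== PORT A =====
def calcular_union (conjunto1 : List Int) (conjunto2 : List Int) : List Int :=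
  conjunto2.foldl (fun union digito => if digito ∉ union then union ++ [digito] else union) conjunto1

def calcular_interseccion (conjunto1 : List Int) (conjunto2 : List Int) : List Int :=
  conjunto2.foldl (fun interseccion digito => if digito ∈ conjunto1 then interseccion ++ [digito] else interseccion) []

def calcular_diferencia_simetrica (conjunto1 : List Int) (conjunto2 : List Int) : List Int :=
  let union := calcular_union conjunto1 conjunto2
  let interseccion := calcular_interseccion conjunto1 conjunto2
  union.foldl (fun dif digito => if digito ∉ interseccion then dif ++ [digito] else dif) []

-- ===== PORT B =====
def calcular_diferencia_simetrica_alt (conjunto1 : List Int) (conjunto2 : List Int) : List Int :=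
  let r1 := conjunto1.foldl (fun r d => if d ∉ conjunto2 then r ++ [d] else r) []
  conjunto2.foldl (fun r d => if d ∉ conjunto1 ∧ d ∉ r then r ++ [d] else r) r1

-- ===== PRECONDITION & SPEC =====
def Spec_calcular_diferencia_simetrica (conjunto1 : List Int) (conjunto2 : List Int) (out : List Int) : Prop := out = calcular_diferencia_simetrica_alt conjunto1 conjunto2
instance (conjunto1 : List Int) (conjunto2 : List Int) (out : List Int) : Decidable (Spec_calcular_diferencia_simetrica conjunto1 conjunto2 out) := by unfold Spec_calcular_diferencia_simetrica; infer_instance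

-- ===== CLAIM (what is proved, stated in full; the proofs are below) =====
def Claim_equal_calcular_diferencia_simetrica : Prop := ∀ (conjunto1 : List Int) (conjunto2 : List Int), Dom_calcular_diferencia_simetrica conjunto1 conjunto2 → Spec_calcular_diferencia_simetrica conjunto1 conjunto2 (calcular_diferencia_simetrica conjunto1 conjunto2)

-- ===== LEMMAS AND PROOFS =====

-- an append-if fold with a state-independent test is a filter
theorem foldl_app_filter (p : Int → Prop) [DecidablePred p] (xs acc : List Int) :
    xs.foldl (fun r d => if p d then r ++ [d] else r) acc
      = acc ++ xs.filter (fun d => decide (p d)) := by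
  induction xs generalizing acc with
  | nil => simp
  | cons x xs ih =>
      simp only [List.foldl_cons, List.filter_cons]
      by_cases h : p x <;> simp [h, ih]

-- joint invariant: B's running result equals the filter of A's running union
theorem key (conjunto1 I : List Int) (hI : ∀ d, d ∈ I → d ∈ conjunto1) :
    ∀ (c2 u r : List Int),
      r = u.filter (fun d => decide (d ∉ I)) →
      (∀ d, d ∈ conjunto1 → d ∈ u) →
      (c2.foldl (fun union digito => if digito ∉ union then union ++ [digito] else union) u).filter
          (fun d => decide (d ∉ I))
        = c2.foldl (fun r d => if d ∉ conjunto1 ∧ d ∉ r then r ++ [d] else r) r := by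
  intro c2
  induction c2 with
  | nil => intro u r hr _; simpa using hr.symm
  | cons x c2 ih =>
      intro u r hr hc1
      simp only [List.foldl_cons]
      by_cases hu : x ∈ u
      · have hx : ¬ (x ∉ conjunto1 ∧ x ∉ r) := by
          intro ⟨h1, h2⟩
          by_cases hIx : x ∈ I
          · exact h1 (hI x hIx)
          · exact h2 (by subst hr; simp [List.mem_filter, hu, hIx])
        simp only [hu, not_true, hx, ite_false]
        exact ih u r hr hc1
      · have h1 : x ∉ conjunto1 := fun h => hu (hc1 x h)
        have hxI : x ∉ I := fun h => h1 (hI x h)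
        have h2 : x ∉ r := by
          subst hr; intro h; exact hu (List.mem_of_mem_filter h)
        simp only [hu, not_false_iff, ite_true, h1, h2, and_self]
        exact ih (u ++ [x]) (r ++ [x])
          (by subst hr; simp [List.filter_append, hxI])
          (fun d hd => List.mem_append_left _ (hc1 d hd))

-- ===== VERDICT (by name: the statement is the Claim_ definition above) =====
theorem calcular_diferencia_simetrica_spec : Claim_equal_calcular_diferencia_simetrica := by
  intro c1 c2 _
  unfold Spec_calcular_diferencia_simetrica calcular_diferencia_simetrica
    calcular_diferencia_simetrica_alt calcular_union calcular_interseccion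
  simp only
  rw [foldl_app_filter (fun d => d ∈ c1) c2 [], foldl_app_filter (fun d => d ∉ c2) c1 []]
  simp only [List.nil_append]
  refine Eq.trans (foldl_app_filter (fun d => d ∉ (c2.filter (fun d => decide (d ∈ c1)))) _ []) ?_
  simp only [List.nil_append]
  refine key c1 _ (fun d hd => ?_) c2 c1 _ ?_ (fun d hd => hd)
  · have := List.mem_filter.mp hd; simpa using this.2
  · refine (List.filter_congr ?_).symm
    intro d hd
    simp [List.mem_filter, hd]
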